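-- pv_equiv track=rewrite | github.com/lorn-jaeger/wrf-run | misc/rerun_day_failures.py | group_rows_by_date
-- ===== SOURCE A (Python) =====
-- from typing import Dict, List, Sequence, Tuple
--
-- def group_rows_by_date(rows: Sequence[Dict[str, str]]) -> List[Tuple[str, List[Dict[str, str]]]]:
--     grouped: Dict[str, List[Dict[str, str]]] = {}
--     ordered: List[str] = []
--     for row in rows:
--         date = row["date"]
--         if date not in grouped:
--             grouped[date] = []
--             ordered.append(date)
--         grouped[date].append(row)
--     return [(date, grouped[date]) for date in ordered]
-- ===== SOURCE B (Python) =====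
-- def group_rows_by_date(rows):
--     dates = list(dict.fromkeys(row["date"] for row in rows))
--     return [(date, [row for row in rows if row["date"] == date]) for date in dates]
-- ===== Notes on version B (the rewrite author's own statement) =====
-- stated objective: alternative
-- what changed: Replaces the single-pass dict-accumulator grouping with a two-phase shape: first compute the ordered distinct dates via dict.fromkeys, then build each group by a filtering scan of all rows.
import Mathlib
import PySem

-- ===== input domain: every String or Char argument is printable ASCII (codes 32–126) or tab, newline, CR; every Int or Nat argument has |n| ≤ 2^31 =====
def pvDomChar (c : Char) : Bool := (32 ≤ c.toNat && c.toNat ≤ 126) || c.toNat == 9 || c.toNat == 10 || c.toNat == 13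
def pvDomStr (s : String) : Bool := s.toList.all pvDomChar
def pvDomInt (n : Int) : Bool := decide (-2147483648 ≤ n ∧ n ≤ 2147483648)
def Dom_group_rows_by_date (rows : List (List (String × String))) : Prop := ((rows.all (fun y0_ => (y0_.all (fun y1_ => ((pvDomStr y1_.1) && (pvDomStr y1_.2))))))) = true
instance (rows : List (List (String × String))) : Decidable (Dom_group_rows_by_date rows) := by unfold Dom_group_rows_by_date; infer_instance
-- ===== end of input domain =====

-- B replaces A's single-pass dict-accumulator grouping by "ordered distinct dates, then one
-- filtering scan per date" (objective: alternative decomposition, not faster).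

-- row["date"]; total form with default "" — Pre_ excludes rows without a "date" key (KeyError in Python)
def pvKey (row : List (String × String)) : String :=
  ((PySem.Dict.mk row).get? "date").getD ""

-- ===== PORT A =====
def group_rows_by_date (rows : List (List (String × String))) : List (String × (List (List (String × String)))) :=
  let r := rows.foldl
    (fun (s : PySem.Dict String (List (List (String × String))) × List String) row =>
      let date := pvKey row
      let s := if s.1.contains date then s else (s.1.insert date [], s.2 ++ [date])
      (s.1.modify date [] (· ++ [row]), s.2))
    (PySem.Dict.empty, [])
  r.2.map (fun date => (date, r.1.getD date []))

-- ===== PORT B =====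
def group_rows_by_date_alt (rows : List (List (String × String))) : List (String × (List (List (String × String)))) :=
  let dates := PySem.List.dedup (rows.map pvKey)
  dates.map (fun date => (date, rows.filter (fun row => pvKey row == date)))

-- ===== PRECONDITION & SPEC =====
-- Pre_ excludes exactly the rows missing a "date" key, on which Python A raises KeyError.
def Pre_group_rows_by_date (rows : List (List (String × String))) : Prop :=
  ∀ row ∈ rows, "date" ∈ row.map Prod.fst
instance (rows : List (List (String × String))) : Decidable (Pre_group_rows_by_date rows) := by
  unfold Pre_group_rows_by_date; infer_instance
def pvWitness_group_rows_by_date : (List (List (String × String))) :=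
  [[("date", "2020-01-01"), ("id", "3")], [("date", "2020-01-02")], [("date", "2020-01-01")]]

def Spec_group_rows_by_date (rows : List (List (String × String))) (out : List (String × (List (List (String × String))))) : Prop := out = group_rows_by_date_alt rows
instance (rows : List (List (String × String))) (out : List (String × (List (List (String × String))))) : Decidable (Spec_group_rows_by_date rows out) := by unfold Spec_group_rows_by_date; infer_instance

-- ===== CLAIM (what is proved, stated in full; the proofs are below) =====
def Claim_equal_group_rows_by_date : Prop := ∀ (rows : List (List (String × String))), Dom_group_rows_by_date rows → Pre_group_rows_by_date rows → Spec_group_rows_by_date rows (group_rows_by_date rows)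

-- ===== LEMMAS AND PROOFS =====

-- modify on an absent key is insert-then-modify
lemma modify_insert_absent (g : PySem.Dict String (List (List (String × String))))
    (d : String) (f : List (List (String × String)) → List (List (String × String)))
    (h : g.contains d = false) :
    (g.insert d []).modify d [] f = g.modify d [] f := by
  simp [PySem.Dict.modify, PySem.Dict.getD_insert_self, PySem.Dict.insert_insert_self,
        PySem.Dict.getD_of_not_contains g [] h]

-- A's loop, characterised: grouped is the pure modify-fold, ordered is the set-update
lemma loopA (rows : List (List (String × String)))
    (g : PySem.Dict String (List (List (String × String)))) (o : List String)
    (hc : ∀ d, g.contains d = decide (d ∈ o)) :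
    rows.foldl
      (fun (s : PySem.Dict String (List (List (String × String))) × List String) row =>
        let date := pvKey row
        let s := if s.1.contains date then s else (s.1.insert date [], s.2 ++ [date])
        (s.1.modify date [] (· ++ [row]), s.2))
      (g, o)
    = (rows.foldl (fun g row => g.modify (pvKey row) [] (· ++ [row])) g,
       PySem.Set.update o (rows.map pvKey)) := by
  induction rows generalizing g o with
  | nil => simp [PySem.Set.update]
  | cons r rest ih =>
    simp only [List.foldl_cons, List.map_cons, PySem.Set.update_cons]
    by_cases hmem : pvKey r ∈ o
    · have hct : g.contains (pvKey r) = true := by rw [hc]; simpa using hmem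
      rw [if_pos hct, PySem.Set.add_of_mem hmem]
      exact ih _ _ (by
        intro d
        rw [PySem.Dict.contains_modify, hc]
        by_cases hd : d = pvKey r
        · subst hd; simp [hmem]
        · simp [hd])
    · have hct : g.contains (pvKey r) = false := by rw [hc]; simpa using hmem
      rw [if_neg (by simp [hct]), PySem.Set.add_of_not_mem hmem]
      simp only [modify_insert_absent g (pvKey r) _ hct]
      exact ih _ _ (by
        intro d
        rw [PySem.Dict.contains_modify, hc]
        by_cases hd : d = pvKey r
        · subst hd; simp
        · simp [hd])

-- the grouped dict, looked up: exactly B's filter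
lemma getD_group (rows : List (List (String × String))) (d : String) :
    (rows.foldl (fun g row => g.modify (pvKey row) [] (· ++ [row]))
        (PySem.Dict.empty : PySem.Dict String (List (List (String × String))))).getD d []
    = rows.filter (fun row => pvKey row == d) := by
  have h := PySem.Dict.getD_foldl_modify_append
    (l := rows.map (fun row => (pvKey row, row)))
    (d := (PySem.Dict.empty : PySem.Dict String (List (List (String × String))))) (c := d)
  rw [List.foldl_map] at h
  simpa [List.filter_map, Function.comp_def, List.map_map] using h

-- ===== VERDICT (by name: the statement is the Claim_ definition above) =====
theorem group_rows_by_date_spec : Claim_equal_group_rows_by_date := by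
  intro rows _ _
  unfold Spec_group_rows_by_date group_rows_by_date group_rows_by_date_alt
  rw [loopA rows PySem.Dict.empty [] (by intro d; simp)]
  simp only [PySem.List.dedup_eq_ofList, ← PySem.Set.update_nil_left]
  exact List.map_congr_left (fun d _ => by rw [getD_group])
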